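-- pv_equiv track=rewrite | github.com/alexandergz1983/inversions_GC_skew_Hp | 2_gbff2mochi_basename.py | order_cleaner
-- ===== SOURCE A (Python) =====
-- def order_cleaner(ordered_coordinates):
-- 	"""Certain features are annotated as 'order(123..543, 678..987)' and these need to be cleaned up. Returns
-- 	start and stop coordinates, but for the whole thing. i.e. it joins all the individual pieces together,
-- 	which throws away annotations indicating individual pieces. This process could be improved in future versions."""
--
-- 	strp_y = ordered_coordinates.strip("order(").strip(")")
-- 	splt_1 = strp_y.split(",")
-- 	final_coords_ordered = []
-- 	for i in splt_1:
-- 		coordinates_abc = i.split("..")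
-- 		for j in coordinates_abc:
-- 			final_coords_ordered.append(j)
-- 	start_position = final_coords_ordered[0]
-- 	stop_position = final_coords_ordered[-1].strip(")")
--
-- 	# Could add in some sort of annotation for individual joined regions within the name in the future
-- 	gene_nm2 = ""
--
-- 	return start_position, stop_position, gene_nm2
-- ===== SOURCE B (Python) =====
-- def order_cleaner(ordered_coordinates):
-- 	strp_y = ordered_coordinates.strip("order(").strip(")")
-- 	parts = strp_y.split(",")
-- 	start_position = parts[0].split("..")[0]
-- 	stop_position = parts[-1].split("..")[-1].strip(")")
-- 	gene_nm2 = ""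
-- 	return start_position, stop_position, gene_nm2
-- ===== Notes on version B (the rewrite author's own statement) =====
-- stated objective: simpler
-- what changed: Instead of flattening every coordinate token of every comma-separated part into an accumulator list via nested loops and then indexing that list, B splits once on the comma and reads only the two needed tokens directly: the first token of the first part and the last token of the last part.
import Mathlib
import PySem

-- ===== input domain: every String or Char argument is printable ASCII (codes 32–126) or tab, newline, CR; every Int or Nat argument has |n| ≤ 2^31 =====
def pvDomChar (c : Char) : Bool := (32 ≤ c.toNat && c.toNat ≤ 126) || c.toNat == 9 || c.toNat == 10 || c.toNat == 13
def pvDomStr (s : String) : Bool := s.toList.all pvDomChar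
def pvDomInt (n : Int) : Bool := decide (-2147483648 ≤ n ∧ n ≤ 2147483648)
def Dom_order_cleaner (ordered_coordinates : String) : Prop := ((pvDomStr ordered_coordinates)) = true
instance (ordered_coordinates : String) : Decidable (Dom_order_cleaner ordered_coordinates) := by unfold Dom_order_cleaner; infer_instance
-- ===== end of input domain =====

-- ===== PORT A =====
-- B is a simpler decomposition: it reads the first and last tokens directly instead of
-- materialising the full flattened token list with nested loops. Equivalence on the return value.

-- A's nested loop, transliterated: strip chars, split on ",", flatten the ".." splits into an
-- accumulator, then take element 0 and element -1 (the lists are never empty, so Python never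
-- raises; pyGetD's default is unreachable).
def order_cleaner (ordered_coordinates : String) : String × String × String :=
  let strp_y := PySem.Chars.stripChars (PySem.Chars.stripChars ordered_coordinates.toList "order(".toList) ")".toList
  let splt_1 := PySem.Chars.splitOn strp_y [',']
  let final_coords_ordered := splt_1.foldl (fun acc i =>
      (PySem.Chars.splitOn i ['.', '.']).foldl (fun acc2 j => acc2 ++ [j]) acc) []
  let start_position := PySem.List.pyGetD final_coords_ordered 0 []
  let stop_position := PySem.Chars.stripChars (PySem.List.pyGetD final_coords_ordered (-1) []) [')']
  (String.ofList start_position, String.ofList stop_position, "")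

-- ===== PORT B =====
-- B, transliterated: same two strips, one split on ","; start = parts[0].split("..")[0],
-- stop = parts[-1].split("..")[-1].strip(")"); no accumulator list.
def order_cleaner_alt (ordered_coordinates : String) : String × String × String :=
  let strp_y := PySem.Chars.stripChars (PySem.Chars.stripChars ordered_coordinates.toList "order(".toList) ")".toList
  let parts := PySem.Chars.splitOn strp_y [',']
  let start_position := PySem.List.pyGetD (PySem.Chars.splitOn (PySem.List.pyGetD parts 0 []) ['.', '.']) 0 []
  let stop_position := PySem.Chars.stripChars
      (PySem.List.pyGetD (PySem.Chars.splitOn (PySem.List.pyGetD parts (-1) []) ['.', '.']) (-1) []) [')']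
  let gene_nm2 := ""
  (String.ofList start_position, String.ofList stop_position, gene_nm2)

-- ===== PRECONDITION & SPEC =====
def Spec_order_cleaner (ordered_coordinates : String) (out : String × String × String) : Prop := out = order_cleaner_alt ordered_coordinates
instance (ordered_coordinates : String) (out : String × String × String) : Decidable (Spec_order_cleaner ordered_coordinates out) := by unfold Spec_order_cleaner; infer_instance

-- ===== CLAIM (what is proved, stated in full; the proofs are below) =====
def Claim_equal_order_cleaner : Prop := ∀ (ordered_coordinates : String), Dom_order_cleaner ordered_coordinates → Spec_order_cleaner ordered_coordinates (order_cleaner ordered_coordinates)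

-- ===== LEMMAS AND PROOFS =====

-- str.split never returns an empty list
theorem splitOn_go_ne_nil (sep : List Char) (fuel : Nat) (l cur : List Char)
    (acc : List (List Char)) : PySem.Chars.splitOn.go sep fuel l cur acc ≠ [] := by
  induction fuel generalizing l cur acc with
  | zero => simp [PySem.Chars.splitOn.go]
  | succ n ih =>
    cases l with
    | nil => simp [PySem.Chars.splitOn.go]
    | cons c rest =>
      rw [PySem.Chars.splitOn.go]
      split_ifs with h
      · exact ih _ _ _
      · exact ih _ _ _

theorem splitOn_ne_nil (s sep : List Char) : PySem.Chars.splitOn s sep ≠ [] :=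
  splitOn_go_ne_nil sep _ s [] []

-- first element of a flattened list of nonempty chunks = first element of the first chunk
theorem head_flatMap {a b : Type} (f : a → List b) (p : a) (rest : List a) (d : b)
    (hf : f p ≠ []) : (List.flatMap f (p :: rest)).getD 0 d = (f p).getD 0 d := by
  cases h : f p with
  | nil => exact absurd h hf
  | cons x t => simp [List.flatMap_cons, h]

-- last element of a flattened list whose last chunk is nonempty = last element of the last chunk
theorem last_flatMap {a b : Type} (f : a → List b) (l : List a) (d : b) (hl : l ≠ [])
    (hlast : f (l.getLast hl) ≠ []) :
    (List.flatMap f l).getLast?.getD d = (f (l.getLast hl)).getLast?.getD d := by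
  conv_lhs => rw [← List.dropLast_concat_getLast hl]
  rw [List.flatMap_append, List.flatMap_cons, List.flatMap_nil, List.append_nil,
    List.getLast?_append_of_ne_nil _ hlast]

theorem pyGetD_neg_one_eq_getLast?_getD {a : Type} (xs : List a) (d : a) (h : xs ≠ []) :
    PySem.List.pyGetD xs (-1) d = xs.getLast?.getD d := by
  rw [PySem.List.pyGetD_neg_one xs d h, List.getLast?_eq_some_getLast h, Option.getD_some]

-- ===== VERDICT (by name: the statement is the Claim_ definition above) =====
theorem order_cleaner_spec : Claim_equal_order_cleaner := by
  intro s _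
  unfold Spec_order_cleaner order_cleaner order_cleaner_alt
  simp only [PySem.List.foldl_append_singleton, PySem.List.foldl_append_eq_flatMap,
    List.nil_append]
  set strp := PySem.Chars.stripChars (PySem.Chars.stripChars s.toList "order(".toList) ")".toList with hstrp
  set f := fun i => PySem.Chars.splitOn i ['.', '.'] with hf
  have hfne : ∀ i, f i ≠ [] := fun i => splitOn_ne_nil i _
  cases hp : PySem.Chars.splitOn strp [','] with
  | nil => exact absurd hp (splitOn_ne_nil strp _)
  | cons p rest =>
    have hpne : p :: rest ≠ [] := by simp
    have hflat_ne : List.flatMap f (p :: rest) ≠ [] := by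
      cases h0 : f p with
      | nil => exact absurd h0 (hfne p)
      | cons x t => simp [List.flatMap_cons, h0]
    have h1 : PySem.List.pyGetD (List.flatMap f (p :: rest)) 0 [] =
        PySem.List.pyGetD (PySem.Chars.splitOn (PySem.List.pyGetD (p :: rest) 0 []) ['.', '.']) 0 [] := by
      rw [PySem.List.pyGetD_zero, PySem.List.pyGetD_zero_cons, PySem.List.pyGetD_zero]
      exact head_flatMap f p rest [] (hfne p)
    have h2 : PySem.List.pyGetD (List.flatMap f (p :: rest)) (-1) [] =
        PySem.List.pyGetD (PySem.Chars.splitOn (PySem.List.pyGetD (p :: rest) (-1) []) ['.', '.']) (-1) [] := by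
      rw [pyGetD_neg_one_eq_getLast?_getD _ _ hflat_ne,
        PySem.List.pyGetD_neg_one _ _ hpne,
        pyGetD_neg_one_eq_getLast?_getD _ _ (hfne _)]
      exact last_flatMap f (p :: rest) [] hpne (hfne _)
    rw [h1, h2]
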